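-- pv_equiv track=rewrite | github.com/Tarun-asati21/DSA-python-journey | 3912-valid-elements-in-an-array/3912-valid-elements-in-an-array.py | findValidElements
-- ===== SOURCE A (Python) =====
-- def findValidElements(nums: list[int]) -> list[int]:
--     if len(nums) < 3 :
--         return nums
--
--     ans = [nums[0]]
--     for i in range(1, len(nums)-1) :
--         if nums[i] > max(nums[:i]) :
--             ans.append(nums[i])
--         elif nums[i] > max(nums[i+1:]) :
--             ans.append(nums[i])
--         else :
--             continue
--
--     ans.append(nums[-1])
--     return ans
-- ===== SOURCE B (Python) =====
-- def findValidElements(nums: list[int]) -> list[int]: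
--     n = len(nums)
--     if n < 3:
--         return nums
--     # suffix maxima: suf[i] = max(nums[i:]), built right-to-left in one pass
--     suf = []
--     m = nums[-1]
--     for x in reversed(nums):
--         m = max(m, x)
--         suf.append(m)
--     suf.reverse()
--     out = [nums[0]]
--     run = nums[0]  # running max of nums[:i]
--     for i in range(1, n - 1):
--         x = nums[i]
--         if x > run or x > suf[i + 1]:
--             out.append(x)
--         run = max(run, x)
--     out.append(nums[-1])
--     return out
-- ===== Notes on version B (the rewrite author's own statement) =====
-- stated objective: faster
-- what changed: A rescans max(nums[:i]) and max(nums[i+1:]) for every interior index; B precomputes a suffix-maxima list in one backward pass and maintains a running prefix maximum, deciding each element in O(1).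
import Mathlib
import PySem

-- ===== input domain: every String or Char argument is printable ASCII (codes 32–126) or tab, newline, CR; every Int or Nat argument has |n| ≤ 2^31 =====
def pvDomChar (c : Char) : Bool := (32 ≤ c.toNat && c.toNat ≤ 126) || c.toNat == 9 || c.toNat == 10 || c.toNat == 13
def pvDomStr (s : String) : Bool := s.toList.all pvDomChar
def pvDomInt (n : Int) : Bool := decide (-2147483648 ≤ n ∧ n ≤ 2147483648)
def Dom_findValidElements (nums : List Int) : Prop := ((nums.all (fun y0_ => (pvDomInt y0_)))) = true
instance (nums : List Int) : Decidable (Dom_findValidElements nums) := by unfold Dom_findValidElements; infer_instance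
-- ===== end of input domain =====

-- B replaces A's per-index max(nums[:i]) / max(nums[i+1:]) rescans (O(n^2)) by a precomputed
-- suffix-maxima list plus a running prefix maximum, one pass each (O(n)).

-- ===== PORT A =====
-- Python max(l) for a NONEMPTY list of ints (the only way A calls it); [] is unreachable there.
def pyMax : List Int → Int
  | [] => 0
  | h :: t => t.foldl max h

def findValidElements (nums : List Int) : List Int :=
  if PySem.List.len nums < 3 then nums
  else
    let ans := (PySem.List.pyRange 1 (PySem.List.len nums - 1)).foldl
      (fun ans i =>
        if PySem.List.pyGetD nums i 0 > pyMax (PySem.List.slice nums none (some i)) then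
          ans ++ [PySem.List.pyGetD nums i 0]
        else if PySem.List.pyGetD nums i 0 > pyMax (PySem.List.slice nums (some (i + 1)) none) then
          ans ++ [PySem.List.pyGetD nums i 0]
        else ans)
      [PySem.List.pyGetD nums 0 0]
    ans ++ [PySem.List.pyGetD nums (-1) 0]

-- ===== PORT B =====
def findValidElements_alt (nums : List Int) : List Int :=
  if PySem.List.len nums < 3 then nums
  else
    -- suffix maxima: suf[i] = max(nums[i:]), built right-to-left in one pass, then reversed
    let sufRev := (nums.reverse.foldl
      (fun (st : List Int × Int) x =>
        let m := max st.2 x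
        (st.1 ++ [m], m)) ([], PySem.List.pyGetD nums (-1) 0)).1
    let suf := sufRev.reverse
    let st := (PySem.List.pyRange 1 (PySem.List.len nums - 1)).foldl
      (fun (st : List Int × Int) i =>
        let x := PySem.List.pyGetD nums i 0
        let out := if x > st.2 ∨ x > PySem.List.pyGetD suf (i + 1) 0 then st.1 ++ [x] else st.1
        (out, max st.2 x))
      ([PySem.List.pyGetD nums 0 0], PySem.List.pyGetD nums 0 0)
    st.1 ++ [PySem.List.pyGetD nums (-1) 0]

-- ===== PRECONDITION & SPEC =====
def Spec_findValidElements (nums : List Int) (out : List Int) : Prop := out = findValidElements_alt nums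
instance (nums : List Int) (out : List Int) : Decidable (Spec_findValidElements nums out) := by unfold Spec_findValidElements; infer_instance

-- ===== CLAIM (what is proved, stated in full; the proofs are below) =====
def Claim_equal_findValidElements : Prop := ∀ (nums : List Int), Dom_findValidElements nums → Spec_findValidElements nums (findValidElements nums)

-- ===== LEMMAS AND PROOFS =====

-- the condition and projection both loops are shown to filter/map with
def pvKeep (nums : List Int) (i : Int) : Bool :=
  decide (PySem.List.pyGetD nums i 0 > pyMax (nums.take i.toNat) ∨
          PySem.List.pyGetD nums i 0 > pyMax (nums.drop (i.toNat + 1)))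

theorem foldl_max_mem (t : List Int) (a : Int) : t.foldl max a ∈ a :: t := by
  induction t generalizing a with
  | nil => simp
  | cons x xs ih =>
    have h := ih (max a x)
    rw [List.mem_cons] at h
    rw [List.foldl_cons]
    rcases h with h | h
    · rw [h]; rcases max_choice a x with h' | h' <;> simp [h']
    · simp [h]

theorem pyMax_mem (h : Int) (t : List Int) : pyMax (h :: t) ∈ h :: t := by
  simpa [pyMax] using foldl_max_mem t h

theorem pyMax_isMax (h : Int) (t : List Int) : ∀ y ∈ h :: t, y ≤ pyMax (h :: t) := by
  intro y hy
  rcases hy with _ | hy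
  · exact (PySem.List.le_foldl_max t h).1
  · exact (PySem.List.le_foldl_max t h).2 y (by assumption)

theorem maxOf_unique {l : List Int} {m m' : Int}
    (h1 : m ∈ l) (h2 : ∀ y ∈ l, y ≤ m) (h3 : m' ∈ l) (h4 : ∀ y ∈ l, y ≤ m') : m = m' :=
  le_antisymm (h4 m h1) (h2 m' h3)

theorem pyMax_append_singleton (h : Int) (t : List Int) (x : Int) :
    pyMax ((h :: t) ++ [x]) = max (pyMax (h :: t)) x := by
  simp [pyMax, List.foldl_append]

-- prefix-max step: max(nums[:i+1]) = max(max(nums[:i]), nums[i])  for 1 ≤ i < len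
theorem maxTake_step (nums : List Int) (i : Nat) (h1 : 1 ≤ i) (h2 : i < nums.length) :
    pyMax (nums.take (i + 1)) = max (pyMax (nums.take i)) (nums.getD i 0) := by
  have htk : nums.take (i + 1) = nums.take i ++ [nums.getD i 0] := by
    rw [List.take_add_one]
    simp [List.getD, List.getElem?_eq_getElem h2]
  rcases List.exists_cons_of_ne_nil (l := nums.take i)
      (by
        intro hnil
        rw [List.take_eq_nil_iff] at hnil
        rcases hnil with h | h
        · omega
        · subst h; simp at h2) with ⟨y, ys, hys⟩
  rw [htk, hys, pyMax_append_singleton]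

-- scanMax: what B's suffix-building fold appends
def scanMax (m : Int) : List Int → List Int
  | [] => []
  | x :: xs => max m x :: scanMax (max m x) xs

theorem suf_fold_eq (r : List Int) : ∀ (acc : List Int) (m : Int),
    (r.foldl (fun (st : List Int × Int) x => (st.1 ++ [max st.2 x], max st.2 x)) (acc, m)).1
      = acc ++ scanMax m r := by
  induction r with
  | nil => simp [scanMax]
  | cons x xs ih => intro acc m; simp [List.foldl, scanMax, ih]

theorem scanMax_getD (r : List Int) : ∀ (m : Int) (k : Nat), k < r.length →
    (scanMax m r).getD k 0 = (r.take (k + 1)).foldl max m := by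
  induction r with
  | nil => intro m k hk; simp at hk
  | cons x xs ih =>
    intro m k hk
    cases k with
    | zero => simp [scanMax]
    | succ k => simp only [scanMax, List.getD_cons_succ, List.take, List.foldl]
                exact ih (max m x) k (by simpa using hk)

theorem scanMax_length (m : Int) (r : List Int) : (scanMax m r).length = r.length := by
  induction r generalizing m with
  | nil => rfl
  | cons x xs ih => simp [scanMax, ih]

-- a fold of max starting from a member of l, in any traversal order of l, is max(l)
theorem foldl_max_rev_eq_pyMax (h : Int) (t : List Int) (z : Int) (hz : z ∈ h :: t) :
    (h :: t).reverse.foldl max z = pyMax (h :: t) := by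
  have hmem : (h :: t).reverse.foldl max z ∈ z :: (h :: t).reverse :=
    foldl_max_mem (h :: t).reverse z
  have hmem' : (h :: t).reverse.foldl max z ∈ h :: t := by
    rw [List.mem_cons] at hmem
    rcases hmem with h' | h'
    · rw [h']; exact hz
    · rwa [List.mem_reverse] at h'
  have hmax : ∀ y ∈ h :: t, y ≤ (h :: t).reverse.foldl max z := by
    intro y hy
    exact (PySem.List.le_foldl_max (h :: t).reverse z).2 y (by rwa [List.mem_reverse])
  exact maxOf_unique hmem' hmax (pyMax_mem h t) (pyMax_isMax h t)

-- B's suf list: suf[k] = max(nums[k:]) for k < len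
theorem suf_getD (nums : List Int) (hn : nums ≠ []) (k : Nat) (hk : k < nums.length) :
    ((scanMax (nums.getLast hn) nums.reverse).reverse).getD k 0 = pyMax (nums.drop k) := by
  have hlen : (scanMax (nums.getLast hn) nums.reverse).length = nums.length := by
    rw [scanMax_length, List.length_reverse]
  have hk' : k < (scanMax (nums.getLast hn) nums.reverse).length := by omega
  rw [List.getD_reverse _ hk', hlen]
  have hidx : nums.length - 1 - k < nums.reverse.length := by simp; omega
  rw [scanMax_getD _ _ _ (by simpa using hidx)]
  have htk : nums.length - 1 - k + 1 = nums.length - k := by omega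
  rw [htk, List.take_reverse]
  have hdk : nums.length - (nums.length - k) = k := by omega
  rw [hdk]
  -- nums.drop k is nonempty and contains nums.getLast
  have hne : nums.drop k ≠ [] := by
    intro h0; rw [List.drop_eq_nil_iff] at h0; omega
  rcases List.exists_cons_of_ne_nil hne with ⟨y, ys, hys⟩
  have hzmem : nums.getLast hn ∈ nums.drop k := by
    have := List.getLast?_drop (i := k) (l := nums)
    rw [if_neg (by omega), List.getLast?_eq_some_getLast hn] at this
    exact List.mem_of_getLast? this
  rw [hys] at hzmem ⊢
  exact foldl_max_rev_eq_pyMax y ys _ hzmem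

-- B's main loop
theorem bloop (nums suf : List Int)
    (hsuf : ∀ i : Int, 1 ≤ i → i < (nums.length : Int) - 1 →
      PySem.List.pyGetD suf (i + 1) 0 = pyMax (nums.drop (i.toNat + 1))) :
    ∀ (c : Nat) (a : Int) (acc : List Int) (run : Int), 1 ≤ a →
      c = ((nums.length : Int) - 1 - a).toNat →
      run = pyMax (nums.take a.toNat) →
      ((PySem.List.pyRange a ((nums.length : Int) - 1)).foldl
        (fun (st : List Int × Int) i =>
          let x := PySem.List.pyGetD nums i 0
          let out := if x > st.2 ∨ x > PySem.List.pyGetD suf (i + 1) 0 then st.1 ++ [x] else st.1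
          (out, max st.2 x)) (acc, run)).1
      = acc ++ ((PySem.List.pyRange a ((nums.length : Int) - 1)).filter (pvKeep nums)).map
          (fun i => PySem.List.pyGetD nums i 0) := by
  intro c
  induction c with
  | zero =>
    intro a acc run ha hc hrun
    rw [PySem.List.pyRange_one_eq_nil (by omega)]
    simp
  | succ c ih =>
    intro a acc run ha hc hrun
    have hab : a < (nums.length : Int) - 1 := by omega
    have ha0 : ((a.toNat : Nat) : Int) = a := Int.toNat_of_nonneg (by omega)
    rw [PySem.List.pyRange_one_cons hab]
    rw [List.foldl_cons, List.filter_cons]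
    have hget : PySem.List.pyGetD nums a 0 = nums.getD a.toNat 0 := by
      conv_lhs => rw [← ha0, PySem.List.pyGetD_natCast]
    have hstep : max run (PySem.List.pyGetD nums a 0) = pyMax (nums.take (a + 1).toNat) := by
      have h1 : (a + 1).toNat = a.toNat + 1 := by omega
      rw [h1, maxTake_step nums a.toNat (by omega) (by omega), hrun, hget]
    have hkeep : pvKeep nums a = true ↔
        (PySem.List.pyGetD nums a 0 > run ∨
         PySem.List.pyGetD nums a 0 > PySem.List.pyGetD suf (a + 1) 0) := by
      rw [hrun, hsuf a ha hab]
      simp [pvKeep]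
    by_cases hc1 : PySem.List.pyGetD nums a 0 > run ∨
        PySem.List.pyGetD nums a 0 > PySem.List.pyGetD suf (a + 1) 0
    · rw [if_pos (hkeep.mpr hc1)]
      simp only [if_pos hc1]
      rw [ih (a + 1) (acc ++ [PySem.List.pyGetD nums a 0]) _ (by omega) (by omega) hstep]
      simp
    · rw [if_neg (fun h => hc1 (hkeep.mp h))]
      simp only [if_neg hc1]
      exact ih (a + 1) acc _ (by omega) (by omega) hstep

-- A's loop
theorem aloop (nums : List Int) (x0 : List Int) :
    ((PySem.List.pyRange 1 ((nums.length : Int) - 1)).foldl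
      (fun ans i =>
        if PySem.List.pyGetD nums i 0 > pyMax (PySem.List.slice nums none (some i)) then
          ans ++ [PySem.List.pyGetD nums i 0]
        else if PySem.List.pyGetD nums i 0 > pyMax (PySem.List.slice nums (some (i + 1)) none) then
          ans ++ [PySem.List.pyGetD nums i 0]
        else ans) x0)
    = x0 ++ ((PySem.List.pyRange 1 ((nums.length : Int) - 1)).filter (pvKeep nums)).map
        (fun i => PySem.List.pyGetD nums i 0) := by
  rw [PySem.List.foldl_congr_mem _ _
    (fun ans i => if pvKeep nums i then ans ++ [PySem.List.pyGetD nums i 0] else ans) x0 ?_]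
  · exact PySem.List.foldl_append_if (pvKeep nums) _ _ x0
  · intro acc i hi
    rw [PySem.List.mem_pyRange_one] at hi
    obtain ⟨h1, h2⟩ := hi
    rw [PySem.List.slice_to nums (by omega), PySem.List.slice_from nums (by omega)]
    have he : (i + 1).toNat = i.toNat + 1 := by omega
    rw [he]
    by_cases c1 : PySem.List.pyGetD nums i 0 > pyMax (nums.take i.toNat) <;>
      by_cases c2 : PySem.List.pyGetD nums i 0 > pyMax (nums.drop (i.toNat + 1)) <;>
        simp [pvKeep, c1, c2]

-- ===== VERDICT (by name: the statement is the Claim_ definition above) =====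
theorem findValidElements_spec : Claim_equal_findValidElements := by
  intro nums _
  unfold Spec_findValidElements findValidElements findValidElements_alt
  by_cases hlen : PySem.List.len nums < 3
  · rw [if_pos hlen, if_pos hlen]
  · rw [if_neg hlen, if_neg hlen]
    have hlen3 : 3 ≤ nums.length := by
      simp only [PySem.List.len_eq] at hlen; omega
    have hn : nums ≠ [] := by intro h; subst h; simp at hlen3
    simp only [PySem.List.len_eq]
    -- A side
    rw [aloop nums [PySem.List.pyGetD nums 0 0]]
    -- B side: the suffix-maxima list
    rw [suf_fold_eq, PySem.List.pyGetD_neg_one nums 0 hn]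
    rw [List.nil_append]
    -- B side: the main loop
    rw [bloop nums ((scanMax (nums.getLast hn) nums.reverse).reverse)
      (by
        intro i hi1 hi2
        have hcast : i + 1 = (((i.toNat + 1 : Nat)) : Int) := by omega
        rw [hcast, PySem.List.pyGetD_natCast]
        exact suf_getD nums hn (i.toNat + 1) (by omega))
      ((nums.length : Int) - 1 - 1).toNat 1 [PySem.List.pyGetD nums 0 0]
      (PySem.List.pyGetD nums 0 0) (by omega) rfl
      (by
        rcases List.exists_cons_of_ne_nil hn with ⟨y, ys, hys⟩
        subst hys
        simp [PySem.List.pyGetD_zero_cons, pyMax])]
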